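-- pv_equiv track=rewrite | github.com/lng205/csnc | tools/visualize.py | _colorblind_palette
-- ===== SOURCE A (Python) =====
-- from typing import Dict, List, Optional, Tuple
--
-- def _colorblind_palette(n: int) -> List[str]:
--     base = ["#0072B2", "#D55E00", "#009E73", "#CC79A7", "#F0E442", "#56B4E9", "#E69F00", "#000000"]
--     if n <= len(base):
--         return base[:n]
--     # repeat if needed
--     out = []
--     i = 0
--     while len(out) < n:
--         out.append(base[i % len(base)])
--         i += 1
--     return out
-- ===== SOURCE B (Python) =====
-- from typing import Dict, List, Optional, Tuple
--
-- def _colorblind_palette(n: int) -> List[str]: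
--     base = ["#0072B2", "#D55E00", "#009E73", "#CC79A7", "#F0E442", "#56B4E9", "#E69F00", "#000000"]
--     if n <= len(base):
--         return base[:n]
--     # closed form: whole repeats by list multiplication, then the leftover prefix
--     return base * (n // len(base)) + base[:n % len(base)]
-- ===== Notes on version B (the rewrite author's own statement) =====
-- stated objective: simpler
-- what changed: The while-loop with a running index is replaced by a closed-form construction: list multiplication for the whole repeats of the palette plus a slice for the remainder.
import Mathlib
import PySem

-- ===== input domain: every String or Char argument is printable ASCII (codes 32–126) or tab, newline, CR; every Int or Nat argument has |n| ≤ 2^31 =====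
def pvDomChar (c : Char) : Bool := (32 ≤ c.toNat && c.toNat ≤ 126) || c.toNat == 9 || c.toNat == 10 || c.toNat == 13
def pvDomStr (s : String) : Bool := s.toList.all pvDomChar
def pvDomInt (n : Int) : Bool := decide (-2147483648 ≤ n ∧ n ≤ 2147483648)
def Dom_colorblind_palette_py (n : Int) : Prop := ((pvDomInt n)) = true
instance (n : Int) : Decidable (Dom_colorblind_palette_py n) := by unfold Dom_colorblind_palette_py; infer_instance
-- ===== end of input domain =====

-- B replaces A's element-by-element while-loop with a closed-form repeats-plus-remainder construction (objective: simpler).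

-- ===== PORT A =====
def pvBase : List String :=
  ["#0072B2", "#D55E00", "#009E73", "#CC79A7", "#F0E442", "#56B4E9", "#E69F00", "#000000"]

-- the while-loop of A: append base[i % len(base)] until len(out) == n
-- (base[i % 8] never raises since 0 ≤ i % 8 < 8, so pyGetD with default "" is exact)
def pvLoopA (n : Int) (out : List String) (i : Int) : List String :=
  if h : (out.length : Int) < n then
    pvLoopA n (out ++ [PySem.List.pyGetD pvBase (PySem.Int.mod i (pvBase.length : Int)) ""]) (i + 1)
  else out
termination_by (n - out.length).toNat
decreasing_by simp; omega

def colorblind_palette_py (n : Int) : List String :=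
  if n ≤ (pvBase.length : Int) then PySem.List.slice pvBase none (some n)
  else pvLoopA n [] 0

-- ===== PORT B =====
def colorblind_palette_py_alt (n : Int) : List String :=
  if n ≤ (pvBase.length : Int) then PySem.List.slice pvBase none (some n)
  else (List.replicate (PySem.Int.floordiv n (pvBase.length : Int)).toNat pvBase).flatten
       ++ pvBase.take (PySem.Int.mod n (pvBase.length : Int)).toNat

-- ===== PRECONDITION & SPEC =====
def Spec_colorblind_palette_py (n : Int) (out : List String) : Prop := out = colorblind_palette_py_alt n
instance (n : Int) (out : List String) : Decidable (Spec_colorblind_palette_py n out) := by unfold Spec_colorblind_palette_py; infer_instance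

-- ===== CLAIM (what is proved, stated in full; the proofs are below) =====
def Claim_equal_colorblind_palette_py : Prop := ∀ (n : Int), Dom_colorblind_palette_py n → Spec_colorblind_palette_py n (colorblind_palette_py n)

-- ===== LEMMAS AND PROOFS =====

-- the j-th element A's loop appends
def pvG (j : Nat) : String := pvBase.getD (j % 8) ""

def pvF (m : Nat) : List String := (List.range m).map pvG

theorem pvF_add_eight (m : Nat) : pvF (8 + m) = pvBase ++ pvF m := by
  unfold pvF
  rw [List.range_add, List.map_append, List.map_map]
  have h1 : (List.range 8).map pvG = pvBase := by decide
  have h2 : (List.range m).map (pvG ∘ fun x => 8 + x) = (List.range m).map pvG := by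
    apply List.map_congr_left
    intro j _
    simp [pvG, Nat.add_mod_left]
  rw [h1, h2]

theorem pvF_split (q r : Nat) (hr : r ≤ 8) :
    pvF (8 * q + r) = (List.replicate q pvBase).flatten ++ pvBase.take r := by
  induction q with
  | zero =>
    simp only [Nat.mul_zero, Nat.zero_add, List.replicate_zero, List.flatten_nil, List.nil_append]
    interval_cases r <;> decide
  | succ q ih =>
    have h8 : 8 * (q + 1) + r = 8 + (8 * q + r) := by omega
    rw [h8, pvF_add_eight, ih, List.replicate_succ, List.flatten_cons, List.append_assoc]

theorem pvLoopA_eq (n : Int) (hn : 0 < n) :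
    ∀ (m : Nat), (m : Int) ≤ n → pvLoopA n (pvF m) (m : Int) = pvF n.toNat := by
  intro m hm
  have hdec : n.toNat - m < n.toNat + 1 - m := by omega
  by_cases h : (m : Int) < n
  · rw [pvLoopA]
    have hlen : ((pvF m).length : Int) = (m : Int) := by simp [pvF]
    rw [dif_pos (by rw [hlen]; exact h)]
    have hg : PySem.List.pyGetD pvBase (PySem.Int.mod (m : Int) (pvBase.length : Int)) "" = pvG m := by
      have : PySem.Int.mod (m : Int) (pvBase.length : Int) = ((m % 8 : Nat) : Int) := by
        exact_mod_cast PySem.Int.mod_natCast m 8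
      rw [this, PySem.List.pyGetD_natCast]
      rfl
    have hstep : pvF m ++ [PySem.List.pyGetD pvBase (PySem.Int.mod (m : Int) (pvBase.length : Int)) ""] = pvF (m + 1) := by
      rw [hg]; unfold pvF; rw [List.range_succ, List.map_append]; rfl
    rw [hstep]
    have : ((m : Int) + 1) = ((m + 1 : Nat) : Int) := by push_cast; ring
    rw [this]
    exact pvLoopA_eq n hn (m + 1) (by omega)
  · rw [pvLoopA]
    have hlen : ((pvF m).length : Int) = (m : Int) := by simp [pvF]
    rw [dif_neg (by rw [hlen]; exact h)]
    have : m = n.toNat := by omega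
    rw [this]
termination_by m => n.toNat + 1 - m

-- ===== VERDICT (by name: the statement is the Claim_ definition above) =====
theorem colorblind_palette_py_spec : Claim_equal_colorblind_palette_py := by
  intro n _
  unfold Spec_colorblind_palette_py colorblind_palette_py colorblind_palette_py_alt
  by_cases hle : n ≤ (pvBase.length : Int)
  · rw [if_pos hle, if_pos hle]
  · rw [if_neg hle, if_neg hle]
    have hn : 0 < n := by simp [pvBase] at hle; omega
    have h8 : (pvBase.length : Int) = 8 := by decide
    rw [h8] at *
    have hfd : PySem.Int.floordiv n 8 = n / 8 := PySem.Int.floordiv_eq_ediv_of_pos (by omega)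
    have hmd : PySem.Int.mod n 8 = n % 8 := PySem.Int.mod_eq_emod_of_pos (by omega)
    rw [hfd, hmd]
    have h0 : pvLoopA n [] 0 = pvF n.toNat := pvLoopA_eq n hn 0 (by omega)
    rw [h0]
    have hq : n.toNat = 8 * (n / 8).toNat + (n % 8).toNat := by omega
    rw [hq, pvF_split _ _ (by omega)]
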